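-- pv_equiv track=rewrite | github.com/michaelmech/Pluribass | mamba_data_gen.py | straight_draw_flag
-- ===== SOURCE A (Python) =====
-- def straight_draw_flag(hole_r1: int, hole_r2: int, board_ranks: list[int]) -> int:
--     """
--     Very compact rank-bit heuristic:
--     - Build presence mask over ranks 2..A (2..14)
--     - If any 5-card straight window (A-5 .. T-A) has >=4 distinct ranks present -> draw.
--     (This will flag OESD and most gutshots; duplicates don’t count twice.)
--     """
--     present = [0] * 15  # index by rank, ignore 0/1
--     for r in (hole_r1, hole_r2):
--         if 2 <= r <= 14:
--             present[r] = 1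
--     for r in board_ranks:
--         if 2 <= r <= 14:
--             present[r] = 1
--
--     # windows: [A-5] is 14,5,4,3,2; we’ll also check 10..14 (T..A)
--     # Implement as numeric windows 2..6, 3..7, ..., 10..14; and a special wheel (A-5)
--     def window_count(lo: int, hi: int) -> int:
--         return sum(present[r] for r in range(lo, hi + 1))
--
--     # normal windows
--     for lo in range(2, 11):  # 2..10 inclusive -> windows [2..6]..[10..14]
--         if window_count(lo, lo + 4) >= 4:
--             return 1
--
--     # wheel A-5 (A=14 plus 2..5)
--     if present[14] + sum(present[r] for r in (2, 3, 4, 5)) >= 4: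
--         return 1
--
--     return 0
-- ===== SOURCE B (Python) =====
-- def straight_draw_flag(hole_r1: int, hole_r2: int, board_ranks: list[int]) -> int:
--     # Sort-and-scan: dedupe the in-range ranks (ace also counted low as 1),
--     # sort them, and look for four distinct ranks spanning at most 4.
--     rs = {r for r in (hole_r1, hole_r2, *board_ranks) if 2 <= r <= 14}
--     if 14 in rs:
--         rs.add(1)
--     srt = sorted(rs)
--     for i in range(len(srt) - 3):
--         if srt[i + 3] - srt[i] <= 4:
--             return 1
--     return 0
-- ===== Notes on version B (the rewrite author's own statement) =====
-- stated objective: alternative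
-- what changed: Replaces A's rank-presence array scanned by ten fixed 5-rank window sums (with a separate wheel branch) by dedupe-sort-scan: collect the distinct in-range ranks into a set (adding a low ace 1 when 14 is present), sort them, and flag when four consecutive sorted ranks span at most 4.
import Mathlib
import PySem

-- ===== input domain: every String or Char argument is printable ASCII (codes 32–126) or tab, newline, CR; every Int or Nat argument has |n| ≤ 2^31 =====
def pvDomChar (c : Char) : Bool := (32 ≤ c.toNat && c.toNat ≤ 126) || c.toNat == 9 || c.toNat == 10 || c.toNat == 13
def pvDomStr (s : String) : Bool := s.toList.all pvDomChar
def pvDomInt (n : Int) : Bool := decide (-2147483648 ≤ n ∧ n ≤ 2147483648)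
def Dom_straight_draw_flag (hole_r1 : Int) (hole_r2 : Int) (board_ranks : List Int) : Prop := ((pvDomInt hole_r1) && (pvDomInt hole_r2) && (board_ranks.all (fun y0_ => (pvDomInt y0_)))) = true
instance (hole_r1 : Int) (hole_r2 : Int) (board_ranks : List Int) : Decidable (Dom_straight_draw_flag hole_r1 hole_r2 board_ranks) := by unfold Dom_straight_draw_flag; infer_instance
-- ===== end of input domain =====

-- B replaces A's presence array + ten fixed window sums by dedupe-sort-scan: sort the
-- distinct in-range ranks (ace also as low 1) and flag four consecutive sorted ranks
-- spanning at most 4 (alternative algorithm, same result).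

-- ===== PORT A =====
-- 'present[r] = 1' for an int index r (guarded 2 ≤ r ≤ 14, always in range): PySem.List.pySetD is exact here
def pvStepA (p : List Int) (r : Int) : List Int :=
  if 2 ≤ r ∧ r ≤ 14 then PySem.List.pySetD p r 1 else p

-- window_count(lo, hi) = sum(present[r] for r in range(lo, hi+1)); indices stay in 2..14, in range
def pvWindowCount (present : List Int) (lo hi : Int) : Int :=
  ((PySem.List.pyRange lo (hi + 1) 1).map (fun r => PySem.List.pyGetD present r 0)).sum

def straight_draw_flag (hole_r1 : Int) (hole_r2 : Int) (board_ranks : List Int) : Int :=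
  let present := ([hole_r1, hole_r2] : List Int).foldl pvStepA (List.replicate 15 0)
  let present := board_ranks.foldl pvStepA present
  -- 'for lo in range(2, 11): if window_count(...) >= 4: return 1' — early return = first hit = any
  if (PySem.List.pyRange 2 11 1).any (fun lo => 4 ≤ pvWindowCount present lo (lo + 4)) then 1
  else if 4 ≤ PySem.List.pyGetD present 14 0 +
            (([2, 3, 4, 5] : List Int).map (fun r => PySem.List.pyGetD present r 0)).sum then 1
  else 0

-- ===== PORT B =====
def straight_draw_flag_alt (hole_r1 : Int) (hole_r2 : Int) (board_ranks : List Int) : Int :=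
  -- rs = {r for r in (hole_r1, hole_r2, *board_ranks) if 2 <= r <= 14}
  let rs0 : PySem.Set Int :=
    PySem.Set.ofList ((hole_r1 :: hole_r2 :: board_ranks).filter (fun r => decide (2 ≤ r ∧ r ≤ 14)))
  -- if 14 in rs: rs.add(1)
  let rs : PySem.Set Int := if (14 : Int) ∈ rs0 then PySem.Set.add rs0 1 else rs0
  -- srt = sorted(rs)
  let srt := PySem.List.sorted rs (fun x => x) false
  -- for i in range(len(srt) - 3): if srt[i+3] - srt[i] <= 4: return 1  — early return = any
  if (PySem.List.pyRange 0 ((srt.length : Int) - 3) 1).any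
      (fun i => decide (PySem.List.pyGetD srt (i + 3) 0 - PySem.List.pyGetD srt i 0 ≤ 4)) then 1
  else 0

-- ===== PRECONDITION & SPEC =====
def Spec_straight_draw_flag (hole_r1 : Int) (hole_r2 : Int) (board_ranks : List Int) (out : Int) : Prop := out = straight_draw_flag_alt hole_r1 hole_r2 board_ranks
instance (hole_r1 : Int) (hole_r2 : Int) (board_ranks : List Int) (out : Int) : Decidable (Spec_straight_draw_flag hole_r1 hole_r2 board_ranks out) := by unfold Spec_straight_draw_flag; infer_instance

-- ===== CLAIM (what is proved, stated in full; the proofs are below) =====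
def Claim_equal_straight_draw_flag : Prop := ∀ (hole_r1 : Int) (hole_r2 : Int) (board_ranks : List Int), Dom_straight_draw_flag hole_r1 hole_r2 board_ranks → Spec_straight_draw_flag hole_r1 hole_r2 board_ranks (straight_draw_flag hole_r1 hole_r2 board_ranks)

-- ===== LEMMAS AND PROOFS =====

-- the presence list A maintains, read off a bitmask
def pvMaskToList (m : Nat) : List Int :=
  (List.range 15).map (fun i => if m.testBit i then 1 else 0)

-- Nat-level accumulator: the set of marked ranks as a bitmask
def pvStepN (m : Nat) (r : Int) : Nat :=
  if 2 ≤ r ∧ r ≤ 14 then m ||| 2 ^ r.toNat else m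

theorem pvStepA_mask (m : Nat) (r : Int) :
    pvStepA (pvMaskToList m) r = pvMaskToList (pvStepN m r) := by
  unfold pvStepA pvStepN
  split_ifs with h
  · rw [PySem.List.pySetD_of_nonneg (h := by omega)]
    have hk : r.toNat < 15 := by omega
    unfold pvMaskToList
    apply List.ext_getElem
    · simp
    · intro i h1 h2
      simp only [List.getElem_set, List.getElem_map, List.getElem_range] at *
      rw [Nat.testBit_or, Nat.testBit_two_pow]
      by_cases hik : r.toNat = i
      · simp [hik]
      · simp [hik]
  · rfl

theorem pvFoldA_mask (xs : List Int) (m : Nat) :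
    xs.foldl pvStepA (pvMaskToList m) = pvMaskToList (xs.foldl pvStepN m) := by
  induction xs generalizing m with
  | nil => rfl
  | cons x xs ih => simp only [List.foldl_cons]; rw [pvStepA_mask]; exact ih (pvStepN m x)

-- which bits the fold sets: exactly the in-range ranks occurring in the list
theorem pvFold_testBit (xs : List Int) (m : Nat) (k : Nat) :
    ((xs.foldl pvStepN m).testBit k) =
      (m.testBit k || xs.any (fun r => decide (r = (k : Int) ∧ 2 ≤ r ∧ r ≤ 14))) := by
  induction xs generalizing m with
  | nil => simp
  | cons x xs ih =>
    simp only [List.foldl_cons, List.any_cons, ih (pvStepN m x)]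
    have hstep : (pvStepN m x).testBit k = (m.testBit k || decide (x = (k : Int) ∧ 2 ≤ x ∧ x ≤ 14)) := by
      unfold pvStepN
      split_ifs with h
      · rw [Nat.testBit_or, Nat.testBit_two_pow]
        have : (x.toNat = k) ↔ (x = (k : Int)) := by omega
        simp [this, h]
      · simp [h]
    rw [hstep, Bool.or_assoc]

-- A's presence-list read, as a bit test
theorem pvGet (m k : Nat) (hk : k < 15) :
    PySem.List.pyGetD (pvMaskToList m) (k : Int) 0 = if m.testBit k then (1:Int) else 0 := by
  simp [pvMaskToList, PySem.List.pyGetD_natCast, List.getD_eq_getElem?_getD, hk]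

-- the sorted distinct-rank list, named bit by bit (1 present iff the ace bit 14 is)
def pvCanonB (t2 t3 t4 t5 t6 t7 t8 t9 t10 t11 t12 t13 t14 : Bool) : List Int :=
  (if t14 then [1] else []) ++ (if t2 then [2] else []) ++ (if t3 then [3] else []) ++
  (if t4 then [4] else []) ++ (if t5 then [5] else []) ++ (if t6 then [6] else []) ++
  (if t7 then [7] else []) ++ (if t8 then [8] else []) ++ (if t9 then [9] else []) ++
  (if t10 then [10] else []) ++ (if t11 then [11] else []) ++ (if t12 then [12] else []) ++
  (if t13 then [13] else []) ++ (if t14 then [14] else [])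

def pvCanon (m : Nat) : List Int :=
  pvCanonB (m.testBit 2) (m.testBit 3) (m.testBit 4) (m.testBit 5) (m.testBit 6) (m.testBit 7)
    (m.testBit 8) (m.testBit 9) (m.testBit 10) (m.testBit 11) (m.testBit 12) (m.testBit 13)
    (m.testBit 14)

theorem pvCanonB_pairwise (t2 t3 t4 t5 t6 t7 t8 t9 t10 t11 t12 t13 t14 : Bool) :
    (pvCanonB t2 t3 t4 t5 t6 t7 t8 t9 t10 t11 t12 t13 t14).Pairwise (fun a b => a < b) := by
  revert t2 t3 t4 t5 t6 t7 t8 t9 t10 t11 t12 t13 t14; decide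

theorem pvCanonB_mem (t2 t3 t4 t5 t6 t7 t8 t9 t10 t11 t12 t13 t14 : Bool) (a : Int) :
    a ∈ pvCanonB t2 t3 t4 t5 t6 t7 t8 t9 t10 t11 t12 t13 t14 ↔
      ((t14 ∧ a = 1) ∨ (t2 ∧ a = 2) ∨ (t3 ∧ a = 3) ∨ (t4 ∧ a = 4) ∨ (t5 ∧ a = 5) ∨
       (t6 ∧ a = 6) ∨ (t7 ∧ a = 7) ∨ (t8 ∧ a = 8) ∨ (t9 ∧ a = 9) ∨ (t10 ∧ a = 10) ∨
       (t11 ∧ a = 11) ∨ (t12 ∧ a = 12) ∨ (t13 ∧ a = 13) ∨ (t14 ∧ a = 14)) := by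
  unfold pvCanonB
  simp only [List.mem_append]
  constructor
  · rintro (((((((((((((h | h) | h) | h) | h) | h) | h) | h) | h) | h) | h) | h) | h) | h) <;>
      (split_ifs at h <;> simp_all)
  · rintro (⟨ht, ha⟩ | ⟨ht, ha⟩ | ⟨ht, ha⟩ | ⟨ht, ha⟩ | ⟨ht, ha⟩ | ⟨ht, ha⟩ | ⟨ht, ha⟩ |
      ⟨ht, ha⟩ | ⟨ht, ha⟩ | ⟨ht, ha⟩ | ⟨ht, ha⟩ | ⟨ht, ha⟩ | ⟨ht, ha⟩ | ⟨ht, ha⟩) <;>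
      subst ha <;> simp [ht]

-- plain-Nat version of B's index scan, structurally recursive
def pvScan4 : List Int → Bool
  | [] => false
  | a :: t =>
    (match t with
     | _ :: _ :: d :: _ => decide (d - a ≤ 4)
     | _ => false) || pvScan4 t

theorem pvScan_aux (l : List Int) :
    (List.range (l.length - 3)).any (fun k => decide (l.getD (k + 3) 0 - l.getD k 0 ≤ 4)) =
      pvScan4 l := by
  induction l with
  | nil => rfl
  | cons a t ih =>
    match t with
    | [] => rfl
    | [b] => rfl
    | [b, c] => rfl
    | b :: c :: d :: r =>
      have hlen : (a :: b :: c :: d :: r).length - 3 = (r.length) + 1 := by simp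
      rw [hlen, List.range_succ_eq_map, List.any_cons, List.any_map]
      have h0 : (decide ((a :: b :: c :: d :: r).getD (0 + 3) 0 - (a :: b :: c :: d :: r).getD 0 0 ≤ 4))
          = decide (d - a ≤ 4) := by norm_num [List.getD]
      have hrest : ∀ k : Nat,
          ((fun k => decide ((a :: b :: c :: d :: r).getD (k + 3) 0 - (a :: b :: c :: d :: r).getD k 0 ≤ 4)) ∘ Nat.succ) k
          = (fun k : Nat => decide ((b :: c :: d :: r).getD (k + 3) 0 - (b :: c :: d :: r).getD k 0 ≤ 4)) k := by
        intro k
        simp only [Function.comp_apply]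
        simp [List.getD_cons_succ, Nat.succ_eq_add_one, show k + 1 + 3 = (k + 3) + 1 from by omega]
      have ih' : (List.range r.length).any
            (fun k : Nat => decide ((b :: c :: d :: r).getD (k + 3) 0 - (b :: c :: d :: r).getD k 0 ≤ 4))
          = pvScan4 (b :: c :: d :: r) := by
        have hl2 : (b :: c :: d :: r).length - 3 = r.length := by simp
        rw [← ih, hl2]
      rw [h0, List.any_congr rfl hrest, ih']
      rfl

theorem pvScan (l : List Int) :
    ((PySem.List.pyRange 0 ((l.length : Int) - 3) 1).any
      (fun i => decide (PySem.List.pyGetD l (i + 3) 0 - PySem.List.pyGetD l i 0 ≤ 4))) =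
      pvScan4 l := by
  rw [PySem.List.pyRange_one, List.any_map]
  have htn : ((l.length : Int) - 3 - 0).toNat = l.length - 3 := by omega
  rw [htn, ← pvScan_aux l]
  refine List.any_congr rfl ?_
  intro k
  simp only [Function.comp_apply]
  rw [show ((0 : Int) + (k : Int) + 3) = ((k + 3 : Nat) : Int) from by push_cast; ring,
      show ((0 : Int) + (k : Int)) = ((k : Nat) : Int) from by push_cast; ring,
      PySem.List.pyGetD_natCast, PySem.List.pyGetD_natCast]

set_option maxHeartbeats 8000000 in
theorem pvFinal : ∀ t2 t3 t4 t5 t6 t7 t8 t9 t10 t11 t12 t13 t14 : Bool,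
  (if ((decide (4 ≤ (if t2 then (1:Int) else 0) + ((if t3 then (1:Int) else 0) + ((if t4 then (1:Int) else 0) + ((if t5 then (1:Int) else 0) + ((if t6 then (1:Int) else 0) + 0))))) || (decide (4 ≤ (if t3 then (1:Int) else 0) + ((if t4 then (1:Int) else 0) + ((if t5 then (1:Int) else 0) + ((if t6 then (1:Int) else 0) + ((if t7 then (1:Int) else 0) + 0))))) || (decide (4 ≤ (if t4 then (1:Int) else 0) + ((if t5 then (1:Int) else 0) + ((if t6 then (1:Int) else 0) + ((if t7 then (1:Int) else 0) + ((if t8 then (1:Int) else 0) + 0))))) || (decide (4 ≤ (if t5 then (1:Int) else 0) + ((if t6 then (1:Int) else 0) + ((if t7 then (1:Int) else 0) + ((if t8 then (1:Int) else 0) + ((if t9 then (1:Int) else 0) + 0))))) || (decide (4 ≤ (if t6 then (1:Int) else 0) + ((if t7 then (1:Int) else 0) + ((if t8 then (1:Int) else 0) + ((if t9 then (1:Int) else 0) + ((if t10 then (1:Int) else 0) + 0))))) || (decide (4 ≤ (if t7 then (1:Int) else 0) + ((if t8 then (1:Int) else 0) + ((if t9 then (1:Int) else 0) + ((if t10 then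 (1:Int) else 0) + ((if t11 then (1:Int) else 0) + 0))))) || (decide (4 ≤ (if t8 then (1:Int) else 0) + ((if t9 then (1:Int) else 0) + ((if t10 then (1:Int) else 0) + ((if t11 then (1:Int) else 0) + ((if t12 then (1:Int) else 0) + 0))))) || (decide (4 ≤ (if t9 then (1:Int) else 0) + ((if t10 then (1:Int) else 0) + ((if t11 then (1:Int) else 0) + ((if t12 then (1:Int) else 0) + ((if t13 then (1:Int) else 0) + 0))))) || (decide (4 ≤ (if t10 then (1:Int) else 0) + ((if t11 then (1:Int) else 0) + ((if t12 then (1:Int) else 0) + ((if t13 then (1:Int) else 0) + ((if t14 then (1:Int) else 0) + 0))))) || false)))))))))) = true then (1:Int)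
   else if 4 ≤ (if t14 then (1:Int) else 0) + ((if t2 then (1:Int) else 0) + ((if t3 then (1:Int) else 0) + ((if t4 then (1:Int) else 0) + ((if t5 then (1:Int) else 0) + 0)))) then (1:Int) else 0)
  = if pvScan4 (pvCanonB t2 t3 t4 t5 t6 t7 t8 t9 t10 t11 t12 t13 t14) = true then 1 else 0 := by
  intro t2 t3 t4 t5 t6 t7 t8 t9 t10 t11 t12 t13 t14
  revert t2 t3 t4 t5 t6 t7 t8 t9 t10 t11 t12 t13 t14
  decide

set_option maxHeartbeats 1000000 in
theorem pvDecide_eq (m : Nat) :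
    (if (PySem.List.pyRange 2 11 1).any
          (fun lo => 4 ≤ pvWindowCount (pvMaskToList m) lo (lo + 4)) then (1 : Int)
      else if 4 ≤ PySem.List.pyGetD (pvMaskToList m) 14 0 +
            (([2, 3, 4, 5] : List Int).map (fun r => PySem.List.pyGetD (pvMaskToList m) r 0)).sum then 1
      else 0)
     = (if (PySem.List.pyRange 0 (((pvCanon m).length : Int) - 3) 1).any
          (fun i => decide (PySem.List.pyGetD (pvCanon m) (i + 3) 0 - PySem.List.pyGetD (pvCanon m) i 0 ≤ 4)) then 1
        else 0) := by
  rw [pvScan]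
  have g2 := pvGet m 2 (by norm_num); have g3 := pvGet m 3 (by norm_num)
  have g4 := pvGet m 4 (by norm_num); have g5 := pvGet m 5 (by norm_num)
  have g6 := pvGet m 6 (by norm_num); have g7 := pvGet m 7 (by norm_num)
  have g8 := pvGet m 8 (by norm_num); have g9 := pvGet m 9 (by norm_num)
  have g10 := pvGet m 10 (by norm_num); have g11 := pvGet m 11 (by norm_num)
  have g12 := pvGet m 12 (by norm_num); have g13 := pvGet m 13 (by norm_num)
  have g14 := pvGet m 14 (by norm_num)
  push_cast at g2 g3 g4 g5 g6 g7 g8 g9 g10 g11 g12 g13 g14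
  rw [show PySem.List.pyRange 2 11 1 = [2,3,4,5,6,7,8,9,10] from by decide]
  simp only [List.any_cons, List.any_nil, pvWindowCount, List.map_cons, List.map_nil,
    List.sum_cons, List.sum_nil]
  norm_num only
  rw [show PySem.List.pyRange 2 7 1 = [2,3,4,5,6] from by decide,
      show PySem.List.pyRange 3 8 1 = [3,4,5,6,7] from by decide,
      show PySem.List.pyRange 4 9 1 = [4,5,6,7,8] from by decide,
      show PySem.List.pyRange 5 10 1 = [5,6,7,8,9] from by decide,
      show PySem.List.pyRange 6 11 1 = [6,7,8,9,10] from by decide,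
      show PySem.List.pyRange 7 12 1 = [7,8,9,10,11] from by decide,
      show PySem.List.pyRange 8 13 1 = [8,9,10,11,12] from by decide,
      show PySem.List.pyRange 9 14 1 = [9,10,11,12,13] from by decide,
      show PySem.List.pyRange 10 15 1 = [10,11,12,13,14] from by decide]
  simp only [List.map_cons, List.map_nil, List.sum_cons, List.sum_nil,
    g2, g3, g4, g5, g6, g7, g8, g9, g10, g11, g12, g13, g14, pvCanon]
  exact pvFinal (m.testBit 2) (m.testBit 3) (m.testBit 4) (m.testBit 5) (m.testBit 6) (m.testBit 7) (m.testBit 8) (m.testBit 9) (m.testBit 10) (m.testBit 11) (m.testBit 12) (m.testBit 13) (m.testBit 14)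

-- ===== VERDICT (by name: the statement is the Claim_ definition above) =====
set_option maxHeartbeats 3200000 in
theorem straight_draw_flag_spec : Claim_equal_straight_draw_flag := by
  intro h1 h2 bs _
  unfold Spec_straight_draw_flag straight_draw_flag straight_draw_flag_alt
  -- A side: the presence list is the bitmask list of the fold
  have h0 : (List.replicate 15 (0 : Int)) = pvMaskToList 0 := by decide
  have hA1 := pvFoldA_mask [h1, h2] 0
  have hA2 := pvFoldA_mask bs (([h1, h2] : List Int).foldl pvStepN 0)
  simp only [h0, hA1, hA2]
  set m := bs.foldl pvStepN (([h1, h2] : List Int).foldl pvStepN 0) with hm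
  have hfold : m = (h1 :: h2 :: bs).foldl pvStepN 0 := rfl
  -- B side: the sorted set is the canonical bit list of the same mask
  have hbit : ∀ k : Nat, 2 ≤ k → k ≤ 14 →
      (m.testBit k = true ↔ (k : Int) ∈ (h1 :: h2 :: bs)) := by
    intro k hk2 hk14
    rw [hfold, pvFold_testBit]
    simp only [Nat.zero_testBit, Bool.false_or, List.any_eq_true, decide_eq_true_eq]
    constructor
    · rintro ⟨r, hr, rfl, -⟩; exact hr
    · intro hmem; exact ⟨(k : Int), hmem, rfl, by omega, by omega⟩
  have hmemf : ∀ a : Int,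
      a ∈ ((h1 :: h2 :: bs).filter (fun r => decide (2 ≤ r ∧ r ≤ 14))) ↔
        (a ∈ (h1 :: h2 :: bs) ∧ 2 ≤ a ∧ a ≤ 14) := by
    intro a; simp [List.mem_filter]
  have hsrt : PySem.List.sorted
      (if (14 : Int) ∈ PySem.Set.ofList ((h1 :: h2 :: bs).filter (fun r => decide (2 ≤ r ∧ r ≤ 14))) then
        PySem.Set.add (PySem.Set.ofList ((h1 :: h2 :: bs).filter (fun r => decide (2 ≤ r ∧ r ≤ 14)))) 1
      else PySem.Set.ofList ((h1 :: h2 :: bs).filter (fun r => decide (2 ≤ r ∧ r ≤ 14))))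
      (fun x => x) false = pvCanon m := by
    apply PySem.List.sorted_eq_of_perm_of_pairwise_lt
    · -- pvCanon m is a permutation of the set
      rw [List.perm_ext_iff_of_nodup]
      · intro a
        rw [pvCanon, pvCanonB_mem]
        have h14 : (14 : Int) ∈ PySem.Set.ofList ((h1 :: h2 :: bs).filter (fun r => decide (2 ≤ r ∧ r ≤ 14))) ↔
            (14 : Int) ∈ (h1 :: h2 :: bs) := by
          rw [PySem.Set.mem_ofList, hmemf]; simp
        have hofL : ∀ b : Int, b ∈ PySem.Set.ofList ((h1 :: h2 :: bs).filter (fun r => decide (2 ≤ r ∧ r ≤ 14))) ↔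
            (b ∈ (h1 :: h2 :: bs) ∧ 2 ≤ b ∧ b ≤ 14) := by
          intro b; rw [PySem.Set.mem_ofList, hmemf]
        split_ifs with hc
        · rw [PySem.Set.mem_add, hofL]
          constructor
          · rintro (⟨ht, ha1⟩ | h)
            · exact Or.inr ha1
            · left
              rcases h with ⟨ht, rfl⟩ | ⟨ht, rfl⟩ | ⟨ht, rfl⟩ | ⟨ht, rfl⟩ | ⟨ht, rfl⟩ | ⟨ht, rfl⟩ |
                ⟨ht, rfl⟩ | ⟨ht, rfl⟩ | ⟨ht, rfl⟩ | ⟨ht, rfl⟩ | ⟨ht, rfl⟩ | ⟨ht, rfl⟩ | ⟨ht, rfl⟩ <;>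
                refine ⟨?_, by omega, by omega⟩ <;>
              first
                | exact (hbit 2 (by omega) (by omega)).mp ht | exact (hbit 3 (by omega) (by omega)).mp ht
                | exact (hbit 4 (by omega) (by omega)).mp ht | exact (hbit 5 (by omega) (by omega)).mp ht
                | exact (hbit 6 (by omega) (by omega)).mp ht | exact (hbit 7 (by omega) (by omega)).mp ht
                | exact (hbit 8 (by omega) (by omega)).mp ht | exact (hbit 9 (by omega) (by omega)).mp ht
                | exact (hbit 10 (by omega) (by omega)).mp ht | exact (hbit 11 (by omega) (by omega)).mp ht
                | exact (hbit 12 (by omega) (by omega)).mp ht | exact (hbit 13 (by omega) (by omega)).mp ht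
                | exact (hbit 14 (by omega) (by omega)).mp ht
          · rintro (⟨hb2, hb3, hb4⟩ | ha1)
            · right
              interval_cases a <;>
                simp_all [hbit 2 (by omega) (by omega), hbit 3 (by omega) (by omega),
                  hbit 4 (by omega) (by omega), hbit 5 (by omega) (by omega),
                  hbit 6 (by omega) (by omega), hbit 7 (by omega) (by omega),
                  hbit 8 (by omega) (by omega), hbit 9 (by omega) (by omega),
                  hbit 10 (by omega) (by omega), hbit 11 (by omega) (by omega),
                  hbit 12 (by omega) (by omega), hbit 13 (by omega) (by omega),
                  hbit 14 (by omega) (by omega)]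
            · exact Or.inl ⟨(hbit 14 (by omega) (by omega)).mpr (h14.mp hc), ha1⟩
        · -- 14 not present: no ace, t14 is false
          have ht14 : m.testBit 14 = false := by
            rcases hb : m.testBit 14 with _ | _
            · rfl
            · exact absurd (h14.mpr ((hbit 14 (by omega) (by omega)).mp hb)) hc
          rw [hofL]
          simp only [ht14, Bool.false_eq_true, false_and, false_or, or_false]
          constructor
          · rintro (⟨ht, rfl⟩ | ⟨ht, rfl⟩ | ⟨ht, rfl⟩ | ⟨ht, rfl⟩ | ⟨ht, rfl⟩ | ⟨ht, rfl⟩ |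
              ⟨ht, rfl⟩ | ⟨ht, rfl⟩ | ⟨ht, rfl⟩ | ⟨ht, rfl⟩ | ⟨ht, rfl⟩ | ⟨ht, rfl⟩) <;>
              refine ⟨?_, by omega, by omega⟩ <;>
              first
                | exact (hbit 2 (by omega) (by omega)).mp ht | exact (hbit 3 (by omega) (by omega)).mp ht
                | exact (hbit 4 (by omega) (by omega)).mp ht | exact (hbit 5 (by omega) (by omega)).mp ht
                | exact (hbit 6 (by omega) (by omega)).mp ht | exact (hbit 7 (by omega) (by omega)).mp ht
                | exact (hbit 8 (by omega) (by omega)).mp ht | exact (hbit 9 (by omega) (by omega)).mp ht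
                | exact (hbit 10 (by omega) (by omega)).mp ht | exact (hbit 11 (by omega) (by omega)).mp ht
                | exact (hbit 12 (by omega) (by omega)).mp ht | exact (hbit 13 (by omega) (by omega)).mp ht
          · rintro ⟨hb2, hb3, hb4⟩
            interval_cases a <;>
              simp_all [hbit 2 (by omega) (by omega), hbit 3 (by omega) (by omega),
                hbit 4 (by omega) (by omega), hbit 5 (by omega) (by omega),
                hbit 6 (by omega) (by omega), hbit 7 (by omega) (by omega),
                hbit 8 (by omega) (by omega), hbit 9 (by omega) (by omega),
                hbit 10 (by omega) (by omega), hbit 11 (by omega) (by omega),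
                hbit 12 (by omega) (by omega), hbit 13 (by omega) (by omega),
                hbit 14 (by omega) (by omega)]
      · exact ((pvCanonB_pairwise _ _ _ _ _ _ _ _ _ _ _ _ _).imp (fun h => ne_of_lt h))
      · split_ifs with hc
        · exact PySem.Set.nodup_add _ _ (PySem.Set.nodup_ofList _)
        · exact PySem.Set.nodup_ofList _
    · exact pvCanonB_pairwise _ _ _ _ _ _ _ _ _ _ _ _ _
  rw [hsrt]
  exact pvDecide_eq m
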